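-- pv_equiv track=rewrite | github.com/zyt-cpu/python | data/data.py | caseNum
-- ===== SOURCE A (Python) =====
-- def caseNum(value,target):
--     mid={}
--     total=0
--     per_E=0
--     per_M=0
--     per_H=0
--     for key in value:
--         if(value[key][0]==target):
--             total+=1
--             if(value[key][1]=="E"):
--                 per_E+=1
--             elif value[key][1]=="M":
--                 per_M+=1
--             else:
--                 per_H+=1
--     mid["total"]=total
--     mid["E"]=per_E
--     mid["M"]=per_M
--     mid["H"]=per_H
--     return mid
-- ===== SOURCE B (Python) =====
-- def caseNum(value, target):
--     def tally(pred):
--         return sum(1 for v in value.values() if v[0] == target and pred(v[1]))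
--     total = tally(lambda c: True)
--     e = tally(lambda c: c == "E")
--     m = tally(lambda c: c == "M")
--     return {"total": total, "E": e, "M": m, "H": total - e - m}
-- ===== Notes on version B (the rewrite author's own statement) =====
-- stated objective: alternative
-- what changed: Replaces A's single four-counter loop with if/elif branching by three independent branch-free tally passes (a predicate-parameterised sum over matching entries) and derives H arithmetically as total-E-M, reproducing the original catch-all else.
import Mathlib
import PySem

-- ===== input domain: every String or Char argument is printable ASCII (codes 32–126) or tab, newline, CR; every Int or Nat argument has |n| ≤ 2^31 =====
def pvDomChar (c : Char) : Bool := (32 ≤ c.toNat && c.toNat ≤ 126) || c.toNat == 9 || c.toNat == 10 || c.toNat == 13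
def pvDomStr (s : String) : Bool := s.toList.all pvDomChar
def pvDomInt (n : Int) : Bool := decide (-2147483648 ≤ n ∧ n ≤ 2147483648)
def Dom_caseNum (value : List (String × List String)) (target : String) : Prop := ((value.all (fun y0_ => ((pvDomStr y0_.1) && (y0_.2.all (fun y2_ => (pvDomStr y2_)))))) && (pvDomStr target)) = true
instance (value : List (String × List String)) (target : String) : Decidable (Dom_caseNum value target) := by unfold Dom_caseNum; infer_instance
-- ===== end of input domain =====

-- B replaces A's single four-counter branching loop by three independent branch-free tally
-- passes (a predicate-parameterised count of matching entries) with H derived as total-E-M.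

-- ===== PORT A =====
-- One pass over the dict's entries, maintaining four integer counters; iterating
-- 'for key in value' and looking up 'value[key]' visits exactly the (key, value) pairs
-- (keys are unique, see Pre_). value[key][0] / [1] are ported with pyGet? (none = IndexError,
-- excluded by Pre_; the port skips such an entry).
def caseNum (value : List (String × List String)) (target : String) : List (String × Int) :=
  let st := value.foldl (fun (s : Int × Int × Int × Int) kv =>
    match PySem.List.pyGet? kv.2 0 with
    | none => s
    | some v0 =>
      if v0 = target then
        match PySem.List.pyGet? kv.2 1 with
        | none => s
        | some v1 =>
          if v1 = "E" then (s.1 + 1, s.2.1 + 1, s.2.2.1, s.2.2.2)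
          else if v1 = "M" then (s.1 + 1, s.2.1, s.2.2.1 + 1, s.2.2.2)
          else (s.1 + 1, s.2.1, s.2.2.1, s.2.2.2 + 1)
      else s) (0, 0, 0, 0)
  [("total", st.1), ("E", st.2.1), ("M", st.2.2.1), ("H", st.2.2.2)]

-- ===== PORT B =====
-- 'sum(1 for v in value.values() if v[0] == target and pred(v[1]))': a fold adding 1 for
-- each entry passing the filter (v[1] is only indexed when v[0] == target, as in Python's 'and').
def pvStep (target : String) (pred : String → Bool) (acc : Int) (kv : String × List String) : Int :=
  match PySem.List.pyGet? kv.2 0 with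
  | none => acc
  | some v0 =>
    if v0 = target then
      match PySem.List.pyGet? kv.2 1 with
      | none => acc
      | some v1 => if pred v1 then acc + 1 else acc
    else acc

def pvTally (value : List (String × List String)) (target : String) (pred : String → Bool) : Int :=
  value.foldl (pvStep target pred) 0

def caseNum_alt (value : List (String × List String)) (target : String) : List (String × Int) :=
  let total := pvTally value target (fun _ => true)
  let e := pvTally value target (fun c => c == "E")
  let m := pvTally value target (fun c => c == "M")
  [("total", total), ("E", e), ("M", m), ("H", total - e - m)]

-- ===== PRECONDITION & SPEC =====
-- Pre_ excludes exactly the inputs where Python A raises: an entry with an empty value list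
-- (value[key][0] → IndexError) or a matching entry with a single-element list (value[key][1] →
-- IndexError); duplicate keys are excluded because a Python dict cannot contain them (the
-- association-list representation with a repeated key corresponds to no dict input).
def Pre_caseNum (value : List (String × List String)) (target : String) : Prop :=
  (value.map (·.1)).Nodup ∧
  ∀ kv ∈ value, kv.2 ≠ [] ∧ (kv.2.headI = target → 2 ≤ kv.2.length)
instance (value : List (String × List String)) (target : String) : Decidable (Pre_caseNum value target) := by unfold Pre_caseNum; infer_instance

def pvWitness_caseNum : (List (String × List String)) × String :=
  ([("a", ["t", "E"]), ("b", ["t", "Q"]), ("c", ["u", "M"])], "t")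

def Spec_caseNum (value : List (String × List String)) (target : String) (out : List (String × Int)) : Prop := out = caseNum_alt value target
instance (value : List (String × List String)) (target : String) (out : List (String × Int)) : Decidable (Spec_caseNum value target out) := by unfold Spec_caseNum; infer_instance

-- ===== CLAIM (what is proved, stated in full; the proofs are below) =====
def Claim_equal_caseNum : Prop := ∀ (value : List (String × List String)) (target : String), Dom_caseNum value target → Pre_caseNum value target → Spec_caseNum value target (caseNum value target)

-- ===== LEMMAS AND PROOFS =====
lemma pvStep_shift (target : String) (pred : String → Bool) (a : Int) (kv : String × List String) :
    pvStep target pred a kv = a + pvStep target pred 0 kv := by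
  unfold pvStep
  cases PySem.List.pyGet? kv.2 0 with
  | none => simp
  | some v0 =>
    by_cases ht : v0 = target
    · cases PySem.List.pyGet? kv.2 1 with
      | none => simp [ht]
      | some v1 =>
        by_cases hp : pred v1 = true <;> simp [ht, hp] <;> omega
    · simp [ht]

lemma pvTally_shift (target : String) (pred : String → Bool)
    (l : List (String × List String)) (a : Int) :
    l.foldl (pvStep target pred) a = a + pvTally l target pred := by
  induction l generalizing a with
  | nil => simp [pvTally]
  | cons kv rest ih =>
    rw [List.foldl_cons, ih, pvStep_shift]
    conv_rhs => rw [pvTally, List.foldl_cons, ih]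
    omega

lemma pvTally_cons (target : String) (pred : String → Bool)
    (kv : String × List String) (l : List (String × List String)) :
    pvTally (kv :: l) target pred = pvStep target pred 0 kv + pvTally l target pred := by
  rw [pvTally, List.foldl_cons, pvTally_shift]

-- Loop invariant: A's fold, started from any accumulator, adds the three tallies and the rest.
lemma caseNum_loop (target : String) (l : List (String × List String)) (a b c d : Int) :
    l.foldl (fun (s : Int × Int × Int × Int) kv =>
      match PySem.List.pyGet? kv.2 0 with
      | none => s
      | some v0 =>
        if v0 = target then
          match PySem.List.pyGet? kv.2 1 with
          | none => s
          | some v1 =>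
            if v1 = "E" then (s.1 + 1, s.2.1 + 1, s.2.2.1, s.2.2.2)
            else if v1 = "M" then (s.1 + 1, s.2.1, s.2.2.1 + 1, s.2.2.2)
            else (s.1 + 1, s.2.1, s.2.2.1, s.2.2.2 + 1)
        else s) (a, b, c, d)
    = (a + pvTally l target (fun _ => true),
       b + pvTally l target (fun x => x == "E"),
       c + pvTally l target (fun x => x == "M"),
       d + (pvTally l target (fun _ => true)
            - pvTally l target (fun x => x == "E")
            - pvTally l target (fun x => x == "M"))) := by
  induction l generalizing a b c d with
  | nil => simp [pvTally]
  | cons kv rest ih =>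
    simp only [List.foldl_cons]
    cases h0 : PySem.List.pyGet? kv.2 0 with
    | none => rw [ih]; simp [pvTally_cons, pvStep, h0]
    | some v0 =>
      by_cases ht : v0 = target
      · cases h1 : PySem.List.pyGet? kv.2 1 with
        | none => simp only [h0, ht, h1, if_true]; rw [ih]; simp [pvTally_cons, pvStep, h0, h1, ht]
        | some v1 =>
          by_cases he : v1 = "E"
          · simp only [h0, ht, h1, he, if_true]
            rw [ih]
            simp [pvTally_cons, pvStep, h0, h1, ht, he]
            omega
          · by_cases hm : v1 = "M"
            · simp only [h0, ht, h1, he, hm, if_true, if_false]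
              rw [ih]
              simp [pvTally_cons, pvStep, h0, h1, ht, he, hm]
              omega
            · simp only [h0, ht, h1, he, hm, if_true, if_false]
              rw [ih]
              simp [pvTally_cons, pvStep, h0, h1, ht, he, hm]
              omega
      · simp only [h0, ht, if_false]
        rw [ih]
        simp [pvTally_cons, pvStep, h0, ht]
-- ===== VERDICT (by name: the statement is the Claim_ definition above) =====
theorem caseNum_spec : Claim_equal_caseNum := by
  intro value target _hdom _hpre
  unfold Spec_caseNum caseNum caseNum_alt
  simp only [caseNum_loop]
  norm_num
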